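-- pv_equiv track=rewrite | github.com/tirthasg/Data-Structures-And-Algorithms | Combinatorial-Enumeration/Partitioning/11_partitions_of_a_set.py | partitions
-- ===== SOURCE A (Python) =====
-- def partitions(nums):
--     def helper(nums, i, slate):
--         if i == len(nums):
--             result.append([subset[:] for subset in slate])
--             return
--
--         slate.append([nums[i]])
--         helper(nums, i + 1, slate)
--         slate.pop()
--
--         for pick in range(len(slate)):
--             subset = slate[pick]
--             subset.append(nums[i])
--             helper(nums, i + 1, slate)
--             subset.pop()
--
--     result = []
--     helper(nums, 0, [])
--     return result
-- ===== SOURCE B (Python) =====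
-- def partitions(nums):
--     result = [[]]
--     for x in nums:
--         new = []
--         for part in result:
--             new.append(part + [[x]])
--             for j in range(len(part)):
--                 new.append(part[:j] + [part[j] + [x]] + part[j+1:])
--         result = new
--     return result
-- ===== Notes on version B (the rewrite author's own statement) =====
-- stated objective: alternative
-- what changed: Replaced the mutating DFS recursion over an index+slate with an iterative per-element build-up that rewrites the whole partition list once per element (new-block case first, then each existing block in order).
import Mathlib
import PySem

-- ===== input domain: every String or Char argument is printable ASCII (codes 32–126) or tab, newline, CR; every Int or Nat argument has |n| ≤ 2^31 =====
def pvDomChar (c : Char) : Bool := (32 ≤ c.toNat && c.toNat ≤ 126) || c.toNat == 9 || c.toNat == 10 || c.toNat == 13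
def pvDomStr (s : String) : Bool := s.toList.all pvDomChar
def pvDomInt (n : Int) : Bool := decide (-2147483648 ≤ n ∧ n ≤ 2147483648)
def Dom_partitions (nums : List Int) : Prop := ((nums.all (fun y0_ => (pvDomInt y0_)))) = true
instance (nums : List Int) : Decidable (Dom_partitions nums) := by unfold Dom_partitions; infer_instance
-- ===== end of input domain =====

-- B replaces A's mutating DFS recursion with an iterative per-element rebuild of the
-- whole partition list (new-block case first, then each existing block in order).

-- ===== PORT A =====
-- helper(nums, i, slate): the mutation slate.append/.pop becomes passing slate ++ [[x]];
-- subset.append/.pop on slate[pick] becomes passing slate.set pick (slate[pick] ++ [x]).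
-- Python tests `i == len(nums)`; i only grows by 1 from 0, so it never exceeds the length
-- and the `≤` guard (needed for termination) is equivalent.  pick < slate.length, so getD
-- pick [] is exact.  Results are accumulated by concatenation in the same order.
def helperA (nums : List Int) (i : Nat) (slate : List (List Int)) : List (List (List Int)) :=
  if nums.length ≤ i then [slate]
  else
    let x := nums.getD i 0
    helperA nums (i + 1) (slate ++ [[x]]) ++
      (List.range slate.length).flatMap (fun pick =>
        helperA nums (i + 1) (slate.set pick ((slate.getD pick []) ++ [x])))
termination_by nums.length - i
decreasing_by all_goals omega

def partitions (nums : List Int) : List (List (List Int)) :=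
  helperA nums 0 []

-- ===== PORT B =====
-- all extensions of one partition by x: new block first, then x added to each block in order
def expandB (x : Int) (part : List (List Int)) : List (List (List Int)) :=
  (part ++ [[x]]) ::
    (List.range part.length).map (fun j =>
      part.take j ++ [(part.getD j []) ++ [x]] ++ part.drop (j + 1))

def partitions_alt (nums : List Int) : List (List (List Int)) :=
  nums.foldl (fun result x => result.flatMap (expandB x)) [[]]

-- ===== PRECONDITION & SPEC =====
def Spec_partitions (nums : List Int) (out : List (List (List Int))) : Prop := out = partitions_alt nums
instance (nums : List Int) (out : List (List (List Int))) : Decidable (Spec_partitions nums out) := by unfold Spec_partitions; infer_instance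

-- ===== CLAIM (what is proved, stated in full; the proofs are below) =====
def Claim_equal_partitions : Prop := ∀ (nums : List Int), Dom_partitions nums → Spec_partitions nums (partitions nums)

-- ===== LEMMAS AND PROOFS =====

-- B's fold distributes over the partition list: each seed partition evolves independently.
theorem foldl_expand_flatMap (rest : List Int) (l : List (List (List Int))) :
    rest.foldl (fun result x => result.flatMap (expandB x)) l
      = l.flatMap (fun s => rest.foldl (fun result x => result.flatMap (expandB x)) [s]) := by
  induction rest generalizing l with
  | nil => simp [List.foldl]
  | cons x rest ih =>
    simp only [List.foldl_cons]
    rw [ih, List.flatMap_assoc]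
    apply List.flatMap_congr
    intro s _
    rw [← ih]
    simp

-- A's DFS from position i with current slate = B's fold over the remaining elements seeded
-- with that slate.
theorem helperA_eq_foldl (nums : List Int) (k i : Nat) (slate : List (List Int))
    (hk : nums.length - i ≤ k) :
    helperA nums i slate
      = (nums.drop i).foldl (fun result x => result.flatMap (expandB x)) [slate] := by
  induction k generalizing i slate with
  | zero =>
    have h : nums.length ≤ i := by omega
    rw [helperA, if_pos h, List.drop_of_length_le h]
    simp [List.foldl]
  | succ k ih =>
    by_cases h : nums.length ≤ i
    · rw [helperA, if_pos h, List.drop_of_length_le h]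
      simp [List.foldl]
    · have hi : i < nums.length := by omega
      rw [helperA, if_neg h]
      have hdrop : nums.drop i = nums.getD i 0 :: nums.drop (i + 1) := by
        rw [List.getD_eq_getElem _ _ hi, List.drop_eq_getElem_cons hi]
      rw [hdrop, List.foldl_cons]
      have hsingle : List.flatMap (expandB (nums.getD i 0)) [slate]
          = expandB (nums.getD i 0) slate := by simp
      rw [hsingle, foldl_expand_flatMap]
      simp only [expandB]
      rw [List.flatMap_cons, List.flatMap_map]
      congr 1
      · rw [ih _ _ (by omega)]
      · apply List.flatMap_congr  -- pointwise over picks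
        intro pick hpick
        have hp : pick < slate.length := List.mem_range.mp hpick
        rw [ih _ _ (by omega)]
        congr 2
        -- slate.set pick v = take pick ++ [v] ++ drop (pick+1), and slate[pick] = getD
        rw [List.set_eq_take_append_cons_drop, if_pos hp]
        simp

theorem partitions_spec : Claim_equal_partitions := by
  intro nums _
  unfold Spec_partitions partitions partitions_alt
  rw [helperA_eq_foldl nums nums.length 0 [] (by omega)]
  simp
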